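-- pv_equiv track=rewrite | github.com/CodingManiac11/PhishGuard | backend/feature_extractor.py | _detect_uncommon_tld
-- ===== SOURCE A (Python) =====
-- def _detect_uncommon_tld(hostname: str) -> bool:
--     """Detect uncommon/suspicious TLDs often used in malware distribution"""
--     uncommon_tlds = [
--         # Very uncommon/cheap TLDs
--         '.xyz', '.top', '.click', '.link', '.work', '.date',
--         '.racing', '.download', '.stream', '.gdn', '.men',
--         '.loan', '.win', '.bid', '.trade', '.webcam', '.party',
--         '.science', '.review', '.cricket', '.accountant',
--         # Free TLDs often abused
--         '.tk', '.ml', '.ga', '.cf', '.gq',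
--         # Less trusted
--         '.pw', '.cc', '.ws', '.su', '.biz',
--     ]
--
--     hostname_lower = hostname.lower()
--     for tld in uncommon_tlds:
--         if hostname_lower.endswith(tld):
--             return True
--     return False
-- ===== SOURCE B (Python) =====
-- _TLDS = ('xyz.top.click.link.work.date.racing.download.stream.gdn.men.'
--          'loan.win.bid.trade.webcam.party.science.review.cricket.accountant.'
--          'tk.ml.ga.cf.gq.pw.cc.ws.su.biz').split('.')
--
--
-- def _detect_uncommon_tld(hostname: str) -> bool:
--     """Extract the label after the last dot once and look it up, instead of scanning all suffixes."""
--     _, sep, tld = hostname.lower().rpartition('.')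
--     return bool(sep) and tld in _TLDS
-- ===== Notes on version B (the rewrite author's own statement) =====
-- stated objective: idiomatic
-- what changed: Instead of scanning all 31 suspicious-TLD suffixes with endswith, B extracts the label after the last dot once (rpartition) and does a single membership lookup in a table of bare labels built by splitting one dotted blob string, returning False when no dot is present.
import Mathlib
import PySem

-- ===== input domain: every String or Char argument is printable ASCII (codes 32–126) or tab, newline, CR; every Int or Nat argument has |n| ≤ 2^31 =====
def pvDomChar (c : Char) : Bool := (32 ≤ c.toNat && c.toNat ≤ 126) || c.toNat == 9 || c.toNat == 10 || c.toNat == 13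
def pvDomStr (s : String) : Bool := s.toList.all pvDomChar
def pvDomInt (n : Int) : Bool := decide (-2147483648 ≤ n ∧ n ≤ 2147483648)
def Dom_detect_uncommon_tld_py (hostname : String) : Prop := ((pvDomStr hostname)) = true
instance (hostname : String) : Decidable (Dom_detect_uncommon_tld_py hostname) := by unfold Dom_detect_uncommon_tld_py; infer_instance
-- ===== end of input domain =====

-- B replaces A's suffix scan over all 31 TLD strings with one extraction of the label after the
-- last dot followed by a single membership lookup in a table of bare labels (objective: idiomatic).

-- ===== PORT A =====
def pvUncommonTlds : List String := [
  ".xyz", ".top", ".click", ".link", ".work", ".date",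
  ".racing", ".download", ".stream", ".gdn", ".men",
  ".loan", ".win", ".bid", ".trade", ".webcam", ".party",
  ".science", ".review", ".cricket", ".accountant",
  ".tk", ".ml", ".ga", ".cf", ".gq",
  ".pw", ".cc", ".ws", ".su", ".biz"]

-- Python's 'for tld in uncommon_tlds: if hostname_lower.endswith(tld): return True' / 'return False' is List.any
def detect_uncommon_tld_py (hostname : String) : Bool :=
  let hostname_lower := PySem.Str.lower hostname
  pvUncommonTlds.any (fun tld => PySem.Str.endswith hostname_lower tld)

-- ===== PORT B =====
-- Source B's module-level _TLDS = '<blob>'.split('.')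
def pvTlds : List String :=
  (PySem.Str.split? ("xyz.top.click.link.work.date.racing.download.stream.gdn.men.loan.win.bid.trade.webcam.party.science.review.cricket.accountant.tk.ml.ga.cf.gq.pw.cc.ws.su.biz") ".").getD []  -- split? is some: the separator "." is non-empty

-- h.rpartition('.') ported by hand on the char list (exact): the separator is non-empty iff '.' occurs in h,
-- and the part after the LAST '.' is the longest dot-free suffix, i.e. reverse (takeWhile (≠ '.') (reverse h)).
def detect_uncommon_tld_py_alt (hostname : String) : Bool :=
  let cs := (PySem.Str.lower hostname).toList
  let tld := (cs.reverse.takeWhile (fun c => c != '.')).reverse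
  cs.contains '.' && pvTlds.contains (String.ofList tld)

-- ===== PRECONDITION & SPEC =====
def Spec_detect_uncommon_tld_py (hostname : String) (out : Bool) : Prop := out = detect_uncommon_tld_py_alt hostname
instance (hostname : String) (out : Bool) : Decidable (Spec_detect_uncommon_tld_py hostname out) := by unfold Spec_detect_uncommon_tld_py; infer_instance

-- ===== CLAIM (what is proved, stated in full; the proofs are below) =====
def Claim_equal_detect_uncommon_tld_py : Prop := ∀ (hostname : String), Dom_detect_uncommon_tld_py hostname → Spec_detect_uncommon_tld_py hostname (detect_uncommon_tld_py hostname)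

-- ===== LEMMAS AND PROOFS =====

-- Core shape of one endswith test: l ends with '.' :: u (u dot-free) iff l contains a dot and
-- the longest dot-free suffix of l is exactly u.
theorem endswith_dot_label (l u : List Char) (hu : ∀ c ∈ u, (c != '.') = true) :
    PySem.Chars.endswith l ('.' :: u)
      = (l.contains '.' && ((l.reverse.takeWhile (fun c => c != '.')).reverse == u)) := by
  rw [Bool.eq_iff_iff]
  rw [PySem.Chars.endswith_iff]
  simp only [Bool.and_eq_true, beq_iff_eq, List.contains_eq_mem, decide_eq_true_eq]
  rw [← List.reverse_prefix]
  constructor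
  · rintro ⟨t, ht⟩
    simp only [List.reverse_cons] at ht
    have hrev : l.reverse = u.reverse ++ '.' :: t := by
      rw [← ht]; simp
    constructor
    · have : ('.' : Char) ∈ l.reverse := by rw [hrev]; simp
      simpa using this
    · rw [hrev, List.takeWhile_append_of_pos (by simpa using fun c hc => hu c hc)]
      simp
  · rintro ⟨hdot, htw⟩
    have htw' : l.reverse.takeWhile (fun c => c != '.') = u.reverse := by
      have := congrArg List.reverse htw
      simpa using this
    set d := l.reverse.dropWhile (fun c => c != '.') with hd
    have hsplit : l.reverse = u.reverse ++ d := by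
      rw [← htw', hd, List.takeWhile_append_dropWhile]
    have hdne : d ≠ [] := by
      intro hnil
      have : ('.' : Char) ∈ l.reverse := by simpa using hdot
      rw [hsplit, hnil, List.append_nil] at this
      have := hu '.' (by simpa using this)
      simp at this
    have hh : d.head hdne = '.' := by
      have := List.head_dropWhile_not (fun c => c != '.') hdne
      simpa using this
    rcases d with _ | ⟨a, d'⟩
    · exact absurd rfl hdne
    · simp only [List.head_cons] at hh
      subst hh
      exact ⟨d', by simp [hsplit]⟩

theorem ofList_beq_toList (w : List Char) (s : String) :
    (String.ofList w == s) = (w == s.toList) := by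
  rw [Bool.eq_iff_iff]
  simp only [beq_iff_eq]
  constructor
  · intro h; rw [← h]; simp
  · intro h; rw [h]; simp

-- kernel-level unfoldings of the TLD string literals into char lists
set_option maxRecDepth 10000 in
theorem tl_xyz : (".xyz" : String).toList = '.' :: ['x', 'y', 'z'] := rfl

set_option maxRecDepth 10000 in
theorem tl_top : (".top" : String).toList = '.' :: ['t', 'o', 'p'] := rfl

set_option maxRecDepth 10000 in
theorem tl_click : (".click" : String).toList = '.' :: ['c', 'l', 'i', 'c', 'k'] := rfl

set_option maxRecDepth 10000 in
theorem tl_link : (".link" : String).toList = '.' :: ['l', 'i', 'n', 'k'] := rfl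

set_option maxRecDepth 10000 in
theorem tl_work : (".work" : String).toList = '.' :: ['w', 'o', 'r', 'k'] := rfl

set_option maxRecDepth 10000 in
theorem tl_date : (".date" : String).toList = '.' :: ['d', 'a', 't', 'e'] := rfl

set_option maxRecDepth 10000 in
theorem tl_racing : (".racing" : String).toList = '.' :: ['r', 'a', 'c', 'i', 'n', 'g'] := rfl

set_option maxRecDepth 10000 in
theorem tl_download : (".download" : String).toList = '.' :: ['d', 'o', 'w', 'n', 'l', 'o', 'a', 'd'] := rfl

set_option maxRecDepth 10000 in
theorem tl_stream : (".stream" : String).toList = '.' :: ['s', 't', 'r', 'e', 'a', 'm'] := rfl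

set_option maxRecDepth 10000 in
theorem tl_gdn : (".gdn" : String).toList = '.' :: ['g', 'd', 'n'] := rfl

set_option maxRecDepth 10000 in
theorem tl_men : (".men" : String).toList = '.' :: ['m', 'e', 'n'] := rfl

set_option maxRecDepth 10000 in
theorem tl_loan : (".loan" : String).toList = '.' :: ['l', 'o', 'a', 'n'] := rfl

set_option maxRecDepth 10000 in
theorem tl_win : (".win" : String).toList = '.' :: ['w', 'i', 'n'] := rfl

set_option maxRecDepth 10000 in
theorem tl_bid : (".bid" : String).toList = '.' :: ['b', 'i', 'd'] := rfl

set_option maxRecDepth 10000 in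
theorem tl_trade : (".trade" : String).toList = '.' :: ['t', 'r', 'a', 'd', 'e'] := rfl

set_option maxRecDepth 10000 in
theorem tl_webcam : (".webcam" : String).toList = '.' :: ['w', 'e', 'b', 'c', 'a', 'm'] := rfl

set_option maxRecDepth 10000 in
theorem tl_party : (".party" : String).toList = '.' :: ['p', 'a', 'r', 't', 'y'] := rfl

set_option maxRecDepth 10000 in
theorem tl_science : (".science" : String).toList = '.' :: ['s', 'c', 'i', 'e', 'n', 'c', 'e'] := rfl

set_option maxRecDepth 10000 in
theorem tl_review : (".review" : String).toList = '.' :: ['r', 'e', 'v', 'i', 'e', 'w'] := rfl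

set_option maxRecDepth 10000 in
theorem tl_cricket : (".cricket" : String).toList = '.' :: ['c', 'r', 'i', 'c', 'k', 'e', 't'] := rfl

set_option maxRecDepth 10000 in
theorem tl_accountant : (".accountant" : String).toList = '.' :: ['a', 'c', 'c', 'o', 'u', 'n', 't', 'a', 'n', 't'] := rfl

set_option maxRecDepth 10000 in
theorem tl_tk : (".tk" : String).toList = '.' :: ['t', 'k'] := rfl

set_option maxRecDepth 10000 in
theorem tl_ml : (".ml" : String).toList = '.' :: ['m', 'l'] := rfl

set_option maxRecDepth 10000 in
theorem tl_ga : (".ga" : String).toList = '.' :: ['g', 'a'] := rfl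

set_option maxRecDepth 10000 in
theorem tl_cf : (".cf" : String).toList = '.' :: ['c', 'f'] := rfl

set_option maxRecDepth 10000 in
theorem tl_gq : (".gq" : String).toList = '.' :: ['g', 'q'] := rfl

set_option maxRecDepth 10000 in
theorem tl_pw : (".pw" : String).toList = '.' :: ['p', 'w'] := rfl

set_option maxRecDepth 10000 in
theorem tl_cc : (".cc" : String).toList = '.' :: ['c', 'c'] := rfl

set_option maxRecDepth 10000 in
theorem tl_ws : (".ws" : String).toList = '.' :: ['w', 's'] := rfl

set_option maxRecDepth 10000 in
theorem tl_su : (".su" : String).toList = '.' :: ['s', 'u'] := rfl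

set_option maxRecDepth 10000 in
theorem tl_biz : (".biz" : String).toList = '.' :: ['b', 'i', 'z'] := rfl

-- Source B's blob split evaluates to the 31 bare labels
set_option maxRecDepth 100000 in
theorem pvTlds_eval : pvTlds = [
    "xyz", "top", "click", "link", "work", "date",
    "racing", "download", "stream", "gdn", "men",
    "loan", "win", "bid", "trade", "webcam", "party",
    "science", "review", "cricket", "accountant",
    "tk", "ml", "ga", "cf", "gq",
    "pw", "cc", "ws", "su", "biz"] := by decide

set_option maxRecDepth 10000 in
theorem main_reduction (l : List Char) :
    pvUncommonTlds.any (fun tld => PySem.Chars.endswith l tld.toList)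
      = (l.contains '.' && pvTlds.contains
          (String.ofList ((l.reverse.takeWhile (fun c => c != '.')).reverse))) := by
  have hpt : ∀ s ∈ pvUncommonTlds, PySem.Chars.endswith l s.toList
      = (l.contains '.' && ((l.reverse.takeWhile (fun c => c != '.')).reverse == s.toList.tail)) := by
    intro s hs
    fin_cases hs
    · rw [tl_xyz]; exact endswith_dot_label l ['x', 'y', 'z'] (by simp)
    · rw [tl_top]; exact endswith_dot_label l ['t', 'o', 'p'] (by simp)
    · rw [tl_click]; exact endswith_dot_label l ['c', 'l', 'i', 'c', 'k'] (by simp)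
    · rw [tl_link]; exact endswith_dot_label l ['l', 'i', 'n', 'k'] (by simp)
    · rw [tl_work]; exact endswith_dot_label l ['w', 'o', 'r', 'k'] (by simp)
    · rw [tl_date]; exact endswith_dot_label l ['d', 'a', 't', 'e'] (by simp)
    · rw [tl_racing]; exact endswith_dot_label l ['r', 'a', 'c', 'i', 'n', 'g'] (by simp)
    · rw [tl_download]; exact endswith_dot_label l ['d', 'o', 'w', 'n', 'l', 'o', 'a', 'd'] (by simp)
    · rw [tl_stream]; exact endswith_dot_label l ['s', 't', 'r', 'e', 'a', 'm'] (by simp)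
    · rw [tl_gdn]; exact endswith_dot_label l ['g', 'd', 'n'] (by simp)
    · rw [tl_men]; exact endswith_dot_label l ['m', 'e', 'n'] (by simp)
    · rw [tl_loan]; exact endswith_dot_label l ['l', 'o', 'a', 'n'] (by simp)
    · rw [tl_win]; exact endswith_dot_label l ['w', 'i', 'n'] (by simp)
    · rw [tl_bid]; exact endswith_dot_label l ['b', 'i', 'd'] (by simp)
    · rw [tl_trade]; exact endswith_dot_label l ['t', 'r', 'a', 'd', 'e'] (by simp)
    · rw [tl_webcam]; exact endswith_dot_label l ['w', 'e', 'b', 'c', 'a', 'm'] (by simp)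
    · rw [tl_party]; exact endswith_dot_label l ['p', 'a', 'r', 't', 'y'] (by simp)
    · rw [tl_science]; exact endswith_dot_label l ['s', 'c', 'i', 'e', 'n', 'c', 'e'] (by simp)
    · rw [tl_review]; exact endswith_dot_label l ['r', 'e', 'v', 'i', 'e', 'w'] (by simp)
    · rw [tl_cricket]; exact endswith_dot_label l ['c', 'r', 'i', 'c', 'k', 'e', 't'] (by simp)
    · rw [tl_accountant]; exact endswith_dot_label l ['a', 'c', 'c', 'o', 'u', 'n', 't', 'a', 'n', 't'] (by simp)
    · rw [tl_tk]; exact endswith_dot_label l ['t', 'k'] (by simp)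
    · rw [tl_ml]; exact endswith_dot_label l ['m', 'l'] (by simp)
    · rw [tl_ga]; exact endswith_dot_label l ['g', 'a'] (by simp)
    · rw [tl_cf]; exact endswith_dot_label l ['c', 'f'] (by simp)
    · rw [tl_gq]; exact endswith_dot_label l ['g', 'q'] (by simp)
    · rw [tl_pw]; exact endswith_dot_label l ['p', 'w'] (by simp)
    · rw [tl_cc]; exact endswith_dot_label l ['c', 'c'] (by simp)
    · rw [tl_ws]; exact endswith_dot_label l ['w', 's'] (by simp)
    · rw [tl_su]; exact endswith_dot_label l ['s', 'u'] (by simp)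
    · rw [tl_biz]; exact endswith_dot_label l ['b', 'i', 'z'] (by simp)
  rw [PySem.List.any_congr_mem hpt]
  have hsplit : pvUncommonTlds.any
        (fun s => l.contains '.' && ((l.reverse.takeWhile (fun c => c != '.')).reverse == s.toList.tail))
      = (l.contains '.' && pvUncommonTlds.any
          (fun s => (l.reverse.takeWhile (fun c => c != '.')).reverse == s.toList.tail)) := by
    cases l.contains '.' <;> simp [pvUncommonTlds]
  rw [hsplit]
  congr 1
  have hcont : pvTlds.contains
        (String.ofList ((l.reverse.takeWhile (fun c => c != '.')).reverse))
      = pvTlds.any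
          (fun s => String.ofList ((l.reverse.takeWhile (fun c => c != '.')).reverse) == s) := by
    simp only [List.contains_eq_any_beq]
  rw [hcont, pvTlds_eval]
  simp only [ofList_beq_toList, pvUncommonTlds, List.any_cons, List.any_nil,
    tl_xyz, tl_top, tl_click, tl_link, tl_work, tl_date, tl_racing, tl_download, tl_stream, tl_gdn, tl_men, tl_loan, tl_win, tl_bid, tl_trade, tl_webcam, tl_party, tl_science, tl_review, tl_cricket, tl_accountant, tl_tk, tl_ml, tl_ga, tl_cf, tl_gq, tl_pw, tl_cc, tl_ws, tl_su, tl_biz,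
    List.tail_cons]
  rfl

-- ===== VERDICT (by name: the statement is the Claim_ definition above) =====
theorem detect_uncommon_tld_py_spec : Claim_equal_detect_uncommon_tld_py := by
  intro hostname _
  unfold Spec_detect_uncommon_tld_py detect_uncommon_tld_py detect_uncommon_tld_py_alt
  simp only [PySem.Str.endswith_eq]
  exact main_reduction (PySem.Str.lower hostname).toList
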